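-- pv_equiv track=rewrite | github.com/boojang/ktb-2-coding-test-study | Semi/프로그래머스/99주차/코테-빙고판.py | solution
-- ===== SOURCE A (Python) =====
-- def solution(logs):
--     answer = 0
--     prev_day = None
--
--     day_marked = set()
--     weekly_marked = set()
--     monthly_marked = set()
--
--     for log_day, num in logs:
--         # 날짜 변경 시 초기화
--         if log_day != prev_day:
--             prev_day = log_day
--             day_marked.clear()
--
--             if log_day in [1, 8, 15, 22, 29]:
--                 weekly_marked.clear()
--             if log_day == 31:
--                 monthly_marked.clear()
--
--         # 각 빙고판에 번호 추가
--         if 1 <= num <= 9: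
--             day_marked.add(num)
--             answer += count_bingo(day_marked, start=1)
--
--         elif 10 <= num <= 18:
--             weekly_marked.add(num)
--             answer += count_bingo(weekly_marked, start=10)
--
--         elif 19 <= num <= 27:
--             monthly_marked.add(num)
--             answer += count_bingo(monthly_marked, start=19)
--
--     return answer
--
-- def count_bingo(marked, start):
--     """
--     빙고 개수 전부 세기 (가로, 세로, 대각선)
--     """
--     bingo_count = 0
--
--     # 가로줄 3개
--     for r in range(3):
--         row = {start + r*3, start + r*3 + 1, start + r*3 + 2}
--         if row.issubset(marked):
--             bingo_count += 1
--
--     # 세로줄 3개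
--     for c in range(3):
--         col = {start + c, start + 3 + c, start + 6 + c}
--         if col.issubset(marked):
--             bingo_count += 1
--
--     # 대각선 2개
--     if {start, start + 4, start + 8}.issubset(marked):
--         bingo_count += 1
--     if {start + 2, start + 4, start + 6}.issubset(marked):
--         bingo_count += 1
--
--     return bingo_count
-- ===== SOURCE B (Python) =====
-- # 8 bingo lines on a 3x3 board, as cell offsets 0..8
-- _LINES = [[0, 1, 2], [3, 4, 5], [6, 7, 8],
--           [0, 3, 6], [1, 4, 7], [2, 5, 8],
--           [0, 4, 8], [2, 4, 6]]
-- # for each cell, the lines through it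
-- _CELL_LINES = {c: [l for l in _LINES if c in l] for c in range(9)}
--
--
-- def _mark(s, total, num, start):
--     """Mark num on the board (marked set s, start..start+8) and update the
--     running count of completed lines by checking only the lines through num."""
--     if num not in s:
--         s = s | {num}
--         for line in _CELL_LINES[num - start]:
--             if all(start + c in s for c in line):
--                 total += 1
--     return s, total
--
--
-- def solution(logs):
--     answer = 0
--     prev_day = None
--     day_s, day_t = set(), 0
--     week_s, week_t = set(), 0
--     month_s, month_t = set(), 0
--
--     for log_day, num in logs:
--         if log_day != prev_day:
--             prev_day = log_day
--             day_s, day_t = set(), 0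
--             if log_day in (1, 8, 15, 22, 29):
--                 week_s, week_t = set(), 0
--             if log_day == 31:
--                 month_s, month_t = set(), 0
--
--         if 1 <= num <= 9:
--             day_s, day_t = _mark(day_s, day_t, num, 1)
--             answer += day_t
--         elif 10 <= num <= 18:
--             week_s, week_t = _mark(week_s, week_t, num, 10)
--             answer += week_t
--         elif 19 <= num <= 27:
--             month_s, month_t = _mark(month_s, month_t, num, 19)
--             answer += month_t
--
--     return answer
-- ===== Notes on version B (the rewrite author's own statement) =====
-- stated objective: alternative
-- what changed: Instead of rebuilding all 8 line-sets and re-running subset tests over the whole board after every mark, B keeps a running completed-lines total per board and updates it on each newly marked number by checking only the 2-4 lines through that cell via a precomputed cell-to-lines map.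
import Mathlib
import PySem

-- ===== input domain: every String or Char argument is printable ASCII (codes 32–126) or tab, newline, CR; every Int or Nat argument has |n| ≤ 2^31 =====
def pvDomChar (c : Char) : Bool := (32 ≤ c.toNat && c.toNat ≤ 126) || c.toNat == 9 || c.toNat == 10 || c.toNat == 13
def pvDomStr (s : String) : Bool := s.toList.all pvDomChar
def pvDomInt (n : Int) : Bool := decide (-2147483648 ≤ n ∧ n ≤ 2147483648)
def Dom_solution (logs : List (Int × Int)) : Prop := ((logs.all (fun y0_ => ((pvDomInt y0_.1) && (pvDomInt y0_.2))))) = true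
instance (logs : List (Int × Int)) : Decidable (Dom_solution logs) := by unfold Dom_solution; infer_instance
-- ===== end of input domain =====

-- B replaces A's full 8-line re-scan of the board after every mark by a running completed-lines
-- total updated incrementally, checking only the lines through the newly marked cell (objective: alternative).

-- ===== PORT A =====

-- count_bingo(marked, start)
def countBingo (marked : PySem.Set Int) (start : Int) : Int :=
  let bc : Int := 0
  let bc := (PySem.List.pyRange 0 3 1).foldl (fun bc r =>
      if PySem.Set.issubset (PySem.Set.ofList [start + r*3, start + r*3 + 1, start + r*3 + 2]) marked then bc + 1 else bc) bc
  let bc := (PySem.List.pyRange 0 3 1).foldl (fun bc c =>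
      if PySem.Set.issubset (PySem.Set.ofList [start + c, start + 3 + c, start + 6 + c]) marked then bc + 1 else bc) bc
  let bc := if PySem.Set.issubset (PySem.Set.ofList [start, start + 4, start + 8]) marked then bc + 1 else bc
  let bc := if PySem.Set.issubset (PySem.Set.ofList [start + 2, start + 4, start + 6]) marked then bc + 1 else bc
  bc

-- body of A's 'for log_day, num in logs' loop; state (answer, prev_day, day_marked, weekly_marked, monthly_marked)
def stepA (st : Int × Option Int × PySem.Set Int × PySem.Set Int × PySem.Set Int)
    (lg : Int × Int) : Int × Option Int × PySem.Set Int × PySem.Set Int × PySem.Set Int :=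
  let (answer, prevDay, dayM, weekM, monM) := st
  let (logDay, num) := lg
  let (prevDay, dayM, weekM, monM) :=
    if some logDay ≠ prevDay then
      let dayM : PySem.Set Int := PySem.Set.empty
      let weekM := if logDay ∈ [(1:Int),8,15,22,29] then PySem.Set.empty else weekM
      let monM := if logDay = 31 then PySem.Set.empty else monM
      (some logDay, dayM, weekM, monM)
    else (prevDay, dayM, weekM, monM)
  if 1 ≤ num ∧ num ≤ 9 then
    let dayM := PySem.Set.add dayM num
    (answer + countBingo dayM 1, prevDay, dayM, weekM, monM)
  else if 10 ≤ num ∧ num ≤ 18 then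
    let weekM := PySem.Set.add weekM num
    (answer + countBingo weekM 10, prevDay, dayM, weekM, monM)
  else if 19 ≤ num ∧ num ≤ 27 then
    let monM := PySem.Set.add monM num
    (answer + countBingo monM 19, prevDay, dayM, weekM, monM)
  else (answer, prevDay, dayM, weekM, monM)

def solution (logs : List (Int × Int)) : Int :=
  (logs.foldl stepA (0, none, PySem.Set.empty, PySem.Set.empty, PySem.Set.empty)).1

-- ===== PORT B =====

-- _CELL_LINES: for each cell offset 0..8, the bingo lines (as cell-offset lists) through it
def cellLines (cell : Nat) : List (List Int) :=
  match cell with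
  | 0 => [[0,1,2],[0,3,6],[0,4,8]]
  | 1 => [[0,1,2],[1,4,7]]
  | 2 => [[0,1,2],[2,5,8],[2,4,6]]
  | 3 => [[3,4,5],[0,3,6]]
  | 4 => [[3,4,5],[1,4,7],[0,4,8],[2,4,6]]
  | 5 => [[3,4,5],[2,5,8]]
  | 6 => [[6,7,8],[0,3,6],[2,4,6]]
  | 7 => [[6,7,8],[1,4,7]]
  | 8 => [[6,7,8],[2,5,8],[0,4,8]]
  | _ => []

-- _mark(s, total, num, start); the dict index num-start is 0..8 at every call site, so '.toNat' is exact
def markB (s : PySem.Set Int) (total : Int) (num start : Int) : PySem.Set Int × Int :=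
  if PySem.Set.contains s num then (s, total)
  else
    let s' := PySem.Set.union s (PySem.Set.ofList [num])
    let total' := (cellLines (num - start).toNat).foldl
        (fun t line => if line.all (fun c => PySem.Set.contains s' (start + c)) then t + 1 else t) total
    (s', total')

-- body of B's loop; state (answer, prev_day, (day_s, day_t), (week_s, week_t), (month_s, month_t))
def stepB (st : Int × Option Int × (PySem.Set Int × Int) × (PySem.Set Int × Int) × (PySem.Set Int × Int))
    (lg : Int × Int) : Int × Option Int × (PySem.Set Int × Int) × (PySem.Set Int × Int) × (PySem.Set Int × Int) :=
  let (answer, prevDay, day, week, month) := st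
  let (logDay, num) := lg
  let (prevDay, day, week, month) :=
    if some logDay ≠ prevDay then
      let day : PySem.Set Int × Int := (PySem.Set.empty, 0)
      let week := if logDay ∈ [(1:Int),8,15,22,29] then (PySem.Set.empty, 0) else week
      let month := if logDay = 31 then (PySem.Set.empty, 0) else month
      (some logDay, day, week, month)
    else (prevDay, day, week, month)
  if 1 ≤ num ∧ num ≤ 9 then
    let day := markB day.1 day.2 num 1
    (answer + day.2, prevDay, day, week, month)
  else if 10 ≤ num ∧ num ≤ 18 then
    let week := markB week.1 week.2 num 10
    (answer + week.2, prevDay, day, week, month)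
  else if 19 ≤ num ∧ num ≤ 27 then
    let month := markB month.1 month.2 num 19
    (answer + month.2, prevDay, day, week, month)
  else (answer, prevDay, day, week, month)

def solution_alt (logs : List (Int × Int)) : Int :=
  (logs.foldl stepB (0, none, (PySem.Set.empty, 0), (PySem.Set.empty, 0), (PySem.Set.empty, 0))).1

-- ===== PRECONDITION & SPEC =====
def Spec_solution (logs : List (Int × Int)) (out : Int) : Prop := out = solution_alt logs
instance (logs : List (Int × Int)) (out : Int) : Decidable (Spec_solution logs out) := by unfold Spec_solution; infer_instance

-- ===== CLAIM (what is proved, stated in full; the proofs are below) =====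
def Claim_equal_solution : Prop := ∀ (logs : List (Int × Int)), Dom_solution logs → Spec_solution logs (solution logs)

-- ===== LEMMAS AND PROOFS =====

lemma ofList3 (a b c : Int) (hab : a ≠ b) (hac : a ≠ c) (hbc : b ≠ c) :
    PySem.Set.ofList [a,b,c] = [a,b,c] := by
  have h2 : PySem.Set.add [a] b = [a,b] := by
    simp only [PySem.Set.add, PySem.Set.contains]; rw [if_neg]; · rfl
    simp [Ne.symm hab]
  have h3 : PySem.Set.add [a,b] c = [a,b,c] := by
    simp only [PySem.Set.add, PySem.Set.contains]; rw [if_neg]; · rfl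
    simp [Ne.symm hac, Ne.symm hbc]
  show List.foldl PySem.Set.add [] [a,b,c] = [a,b,c]
  simp [List.foldl, h2, h3]

lemma issubset3 (a b c : Int) (s : PySem.Set Int) (hab : a ≠ b) (hac : a ≠ c) (hbc : b ≠ c) :
    PySem.Set.issubset (PySem.Set.ofList [a,b,c]) s = (s.contains a && s.contains b && s.contains c) := by
  rw [ofList3 a b c hab hac hbc]
  show List.all [a,b,c] s.contains = _
  simp [List.all_cons, Bool.and_assoc]

-- number of completed lines as a function of the nine cell-membership booleans
def bingoOf (b0 b1 b2 b3 b4 b5 b6 b7 b8 : Bool) : Int :=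
  (if b0 && b1 && b2 then 1 else 0) + (if b3 && b4 && b5 then 1 else 0) +
  (if b6 && b7 && b8 then 1 else 0) + (if b0 && b3 && b6 then 1 else 0) +
  (if b1 && b4 && b7 then 1 else 0) + (if b2 && b5 && b8 then 1 else 0) +
  (if b0 && b4 && b8 then 1 else 0) + (if b2 && b4 && b6 then 1 else 0)

lemma countBingo_eq (s : PySem.Set Int) (start : Int) :
    countBingo s start = bingoOf (s.contains start) (s.contains (start+1)) (s.contains (start+2))
      (s.contains (start+3)) (s.contains (start+4)) (s.contains (start+5))
      (s.contains (start+6)) (s.contains (start+7)) (s.contains (start+8)) := by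
  have h3 : PySem.List.pyRange 0 3 1 = [0,1,2] := by decide
  simp only [countBingo, h3, List.foldl, bingoOf]
  rw [issubset3 _ _ _ _ (by omega) (by omega) (by omega), issubset3 _ _ _ _ (by omega) (by omega) (by omega),
      issubset3 _ _ _ _ (by omega) (by omega) (by omega), issubset3 _ _ _ _ (by omega) (by omega) (by omega),
      issubset3 _ _ _ _ (by omega) (by omega) (by omega), issubset3 _ _ _ _ (by omega) (by omega) (by omega),
      issubset3 _ _ _ _ (by omega) (by omega) (by omega), issubset3 _ _ _ _ (by omega) (by omega) (by omega)]
  rw [show start + 0*3 = start from by ring, show start + 1*3 = start + 3 from by ring,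
      show start + 2*3 = start + 6 from by ring]
  simp only [add_zero]
  rw [show start + 3 + 1 = start + 4 from by ring, show start + 3 + 2 = start + 5 from by ring,
      show start + 6 + 1 = start + 7 from by ring, show start + 6 + 2 = start + 8 from by ring]
  generalize s.contains start = b0
  generalize s.contains (start+1) = b1
  generalize s.contains (start+2) = b2
  generalize s.contains (start+3) = b3
  generalize s.contains (start+4) = b4
  generalize s.contains (start+5) = b5
  generalize s.contains (start+6) = b6
  generalize s.contains (start+7) = b7
  generalize s.contains (start+8) = b8
  revert b0 b1 b2 b3 b4 b5 b6 b7 b8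
  decide

lemma contains_add (s : PySem.Set Int) (x y : Int) :
    (PySem.Set.add s x).contains y = (s.contains y || y == x) := by
  simp only [PySem.Set.add, PySem.Set.contains]
  by_cases h : List.contains s x
  · simp only [if_pos h]
    by_cases hxy : y = x
    · subst hxy; simp_all
    · simp [hxy]
  · simp only [if_neg h, List.contains_append]
    have hx : [x].contains y = (y == x) := by
      by_cases hxy : x = y
      · subst hxy; simp
      · simp [Ne.symm hxy]
    rw [hx]

lemma union_single (s : PySem.Set Int) (x : Int) :
    PySem.Set.union s (PySem.Set.ofList [x]) = PySem.Set.add s x := by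
  rfl

lemma countBingo_empty (start : Int) : countBingo ([] : PySem.Set Int) start = 0 := by
  rw [countBingo_eq]
  rfl

lemma beq_aa (start c d : Int) (h : c ≠ d) : ((start + c) == (start + d)) = false :=
  beq_eq_false_iff_ne.mpr (by omega)
lemma beq_a0 (start c : Int) (h : c ≠ 0) : ((start + c) == start) = false :=
  beq_eq_false_iff_ne.mpr (by omega)
lemma beq_0a (start d : Int) (h : d ≠ 0) : (start == (start + d)) = false :=
  beq_eq_false_iff_ne.mpr (by omega)

lemma markB_spec (s : PySem.Set Int) (t start num : Int) (ht : t = countBingo s start)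
    (h1 : start ≤ num) (h2 : num ≤ start + 8) :
    markB s t num start = (PySem.Set.add s num, countBingo (PySem.Set.add s num) start) := by
  by_cases hc : PySem.Set.contains s num
  · have hadd : PySem.Set.add s num = s := by simp only [PySem.Set.add, hc, if_pos]
    rw [markB, if_pos hc, hadd, ht]
  · rw [markB, if_neg hc]
    simp only [union_single]
    refine Prod.ext rfl ?_
    obtain ⟨k, hk9, hnum⟩ : ∃ k : Nat, k < 9 ∧ num = start + (k : Int) :=
      ⟨(num - start).toNat, by omega, by omega⟩
    subst hnum ht
    have htn : ((start + (k:Int)) - start).toNat = k := by omega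
    rw [htn]
    interval_cases k <;>
    · simp only [Nat.cast_ofNat, Nat.cast_zero, Nat.cast_one, add_zero, Bool.not_eq_true] at hc
      simp only [cellLines, List.foldl, List.all_cons, List.all_nil, Bool.and_true,
        countBingo_eq, contains_add, Nat.cast_ofNat, Nat.cast_zero, Nat.cast_one, add_zero]
      simp only [hc, Bool.false_or]
      simp only [beq_aa, beq_a0, beq_0a, beq_self_eq_true, ne_eq, Int.reduceEq,
        not_false_eq_true, Bool.or_false, Bool.or_true, Bool.true_and, Bool.and_true,
        Bool.false_or, Bool.and_false, Bool.false_and]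
      generalize s.contains start = b0
      generalize s.contains (start+1) = b1
      generalize s.contains (start+2) = b2
      generalize s.contains (start+3) = b3
      generalize s.contains (start+4) = b4
      generalize s.contains (start+5) = b5
      generalize s.contains (start+6) = b6
      generalize s.contains (start+7) = b7
      generalize s.contains (start+8) = b8
      revert b0 b1 b2 b3 b4 b5 b6 b7 b8
      decide

-- B's loop state is A's state decorated with the running completed-lines totals
def absState (st : Int × Option Int × PySem.Set Int × PySem.Set Int × PySem.Set Int) :
    Int × Option Int × (PySem.Set Int × Int) × (PySem.Set Int × Int) × (PySem.Set Int × Int) :=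
  (st.1, st.2.1, (st.2.2.1, countBingo st.2.2.1 1), (st.2.2.2.1, countBingo st.2.2.2.1 10),
    (st.2.2.2.2, countBingo st.2.2.2.2 19))

lemma add_nil (x : Int) : PySem.Set.add [] x = [x] := rfl

lemma stepB_abs (st : Int × Option Int × PySem.Set Int × PySem.Set Int × PySem.Set Int)
    (lg : Int × Int) : stepB (absState st) lg = absState (stepA st lg) := by
  obtain ⟨ans, pd, d, w, m⟩ := st
  obtain ⟨logDay, num⟩ := lg
  simp only [stepA, stepB, absState]
  split_ifs <;>
    (try simp [countBingo_empty, add_nil]) <;>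
    (try rw [markB_spec ([] : PySem.Set Int) 0 1 num ((countBingo_empty 1).symm) (by omega) (by omega)]) <;>
    (try rw [markB_spec d (countBingo d 1) 1 num rfl (by omega) (by omega)]) <;>
    (try rw [markB_spec ([] : PySem.Set Int) 0 10 num ((countBingo_empty 10).symm) (by omega) (by omega)]) <;>
    (try rw [markB_spec w (countBingo w 10) 10 num rfl (by omega) (by omega)]) <;>
    (try rw [markB_spec ([] : PySem.Set Int) 0 19 num ((countBingo_empty 19).symm) (by omega) (by omega)]) <;>
    (try rw [markB_spec m (countBingo m 19) 19 num rfl (by omega) (by omega)]) <;>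
    (try simp [countBingo_empty, add_nil])

lemma foldl_abs (logs : List (Int × Int)) (st : Int × Option Int × PySem.Set Int × PySem.Set Int × PySem.Set Int) :
    logs.foldl stepB (absState st) = absState (logs.foldl stepA st) := by
  induction logs generalizing st with
  | nil => rfl
  | cons lg rest ih => rw [List.foldl_cons, List.foldl_cons, stepB_abs, ih]

-- ===== VERDICT (by name: the statement is the Claim_ definition above) =====
theorem solution_spec : Claim_equal_solution := by
  intro logs _
  unfold Spec_solution solution solution_alt
  have hinit : ((0 : Int), (none : Option Int), (PySem.Set.empty (α := Int), (0:Int)),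
      (PySem.Set.empty (α := Int), (0:Int)), (PySem.Set.empty (α := Int), (0:Int))) =
      absState (0, none, PySem.Set.empty, PySem.Set.empty, PySem.Set.empty) := by
    simp [absState, countBingo_empty, PySem.Set.empty]
  rw [hinit, foldl_abs]
  rfl
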